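-- pv_equiv track=rewrite | github.com/pypi-data/pypi-mirror-401 | packages/bioflow-insight/bioflow_insight-2.0.11-py3-none-any.whl/src/outils.py | get_code_until_parenthese_count
-- ===== SOURCE A (Python) =====
-- def get_code_until_parenthese_count(code, val, left_2_right = True):
--     parenthese_count = 0
--     quote_single, quote_double = False, False
--     if(left_2_right):
--         tab = list(range(len(code)))
--     else:
--         tab = list(range(len(code)-1, -1, -1))
--     for end in tab:
--         if(parenthese_count==val):
--             if(left_2_right):
--                 return code[:end]
--             else:
--                 return code[end:]
--
--         if(code[end]=="(" and not quote_single and not quote_double):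
--             parenthese_count+=1
--         if(code[end]==")" and not quote_single and not quote_double):
--             parenthese_count-=1
--
--         if(code[end]=="'" and not quote_single and not quote_double):
--             if(code[end-1]!="\\" or (code[end-1]=="\\" and code[end-2]=="\\")):
--                 quote_single=True
--
--         elif(code[end]=="'" and quote_single and not quote_double):
--             if(code[end-1]!="\\" or (code[end-1]=="\\" and code[end-2]=="\\")):
--                 quote_single=False
--
--         if(code[end]=='"' and not quote_single and not quote_double):
--             if(code[end-1]!="\\" or (code[end-1]=="\\" and code[end-2]=="\\")):
--                 quote_double=True
--         elif(code[end]=='"' and not quote_single and quote_double):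
--             if(code[end-1]!="\\" or (code[end-1]=="\\" and code[end-2]=="\\")):
--                 quote_double=False
--
--     if(parenthese_count==val):
--         return code
--     return None
-- ===== SOURCE B (Python) =====
-- def get_code_until_parenthese_count(code, val, left_2_right=True):
--     # Phase 1: one scan building a table of (index, balance-before-index) pairs.
--     idxs = range(len(code)) if left_2_right else range(len(code) - 1, -1, -1)
--     balances = []
--     count, qs, qd = 0, False, False
--     for end in idxs:
--         balances.append((end, count))
--         c = code[end]
--         if c == '(' and not qs and not qd:
--             count += 1
--         elif c == ')' and not qs and not qd:
--             count -= 1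
--         elif c == "'" and not qd:
--             if code[end - 1] != '\\' or code[end - 2] == '\\':
--                 qs = not qs
--         elif c == '"' and not qs:
--             if code[end - 1] != '\\' or code[end - 2] == '\\':
--                 qd = not qd
--     # Phase 2: search the table for the first position whose balance hits val.
--     hit = next((end for end, bal in balances if bal == val), None)
--     if hit is not None:
--         return code[:hit] if left_2_right else code[hit:]
--     return code if count == val else None
-- ===== Notes on version B (the rewrite author's own statement) =====
-- stated objective: alternative
-- what changed: A's single loop that interleaves the early-return balance check with the quote/paren state updates is replaced by two separate phases: one scan that records an (index, balance-before-index) table, then a search of that table for the first balance equal to val (falling back to the final count).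
import Mathlib
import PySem

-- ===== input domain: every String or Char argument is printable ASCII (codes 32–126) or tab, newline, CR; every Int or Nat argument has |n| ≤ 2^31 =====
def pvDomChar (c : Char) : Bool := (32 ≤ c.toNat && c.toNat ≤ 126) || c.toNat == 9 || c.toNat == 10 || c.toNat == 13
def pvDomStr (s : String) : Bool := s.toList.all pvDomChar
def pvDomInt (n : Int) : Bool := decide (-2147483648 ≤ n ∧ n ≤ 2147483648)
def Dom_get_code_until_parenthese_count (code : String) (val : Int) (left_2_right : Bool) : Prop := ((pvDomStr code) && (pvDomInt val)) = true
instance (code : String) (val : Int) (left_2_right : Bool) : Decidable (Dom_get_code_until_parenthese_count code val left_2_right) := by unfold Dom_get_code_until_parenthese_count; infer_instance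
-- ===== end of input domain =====

-- B replaces A's interleaved check-and-update loop with two phases (scan building a (index, balance) table, then a search of that table); same O(n) cost, objective: alternative decomposition.

-- ===== PORT A =====
-- shared by both ports: the escape-lookback test 'code[end-1]!="\\" or (code[end-1]=="\\" and code[end-2]=="\\")'
-- (both Pythons contain this test verbatim; B drops the redundant middle conjunct, same lazy evaluation).
-- pyGetD with default ' ' is exact here: on every evaluation Python performs, the index is in range
-- (negative indices wrap via pyGetD's Python semantics).
def pvEsc (code : List Char) (e : Int) : Bool :=
  if PySem.List.pyGetD code (e - 1) ' ' ≠ '\\' then true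
  else if PySem.List.pyGetD code (e - 1) ' ' = '\\' ∧ PySem.List.pyGetD code (e - 2) ' ' = '\\' then true
  else false

-- one iteration of A's loop body (the part after the early-return check), state = (count, quote_single, quote_double)
def pvStepA (code : List Char) (st : Int × Bool × Bool) (e : Int) : Int × Bool × Bool :=
  let c := PySem.List.pyGetD code e ' '
  let cnt := st.1
  let qs := st.2.1
  let qd := st.2.2
  let cnt := if c = '(' ∧ qs = false ∧ qd = false then cnt + 1 else cnt
  let cnt := if c = ')' ∧ qs = false ∧ qd = false then cnt - 1 else cnt
  let qs' := if c = '\'' ∧ qs = false ∧ qd = false then (if pvEsc code e then true else qs)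
             else if c = '\'' ∧ qs = true ∧ qd = false then (if pvEsc code e then false else qs)
             else qs
  let qd' := if c = '"' ∧ qs' = false ∧ qd = false then (if pvEsc code e then true else qd)
             else if c = '"' ∧ qs' = false ∧ qd = true then (if pvEsc code e then false else qd)
             else qd
  (cnt, qs', qd')

-- A's for-loop with its early return, then the trailing 'if count == val'
def pvLoopA (code : List Char) (val : Int) (left_2_right : Bool) :
    List Int → (Int × Bool × Bool) → Option (List Char)
  | [], st => if st.1 = val then some code else none
  | e :: rest, st =>
      if st.1 = val then
        some (if left_2_right then PySem.List.slice code none (some e)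
              else PySem.List.slice code (some e) none)
      else pvLoopA code val left_2_right rest (pvStepA code st e)

def get_code_until_parenthese_count (code : String) (val : Int) (left_2_right : Bool) : Option String :=
  let cs := code.toList
  let tab := if left_2_right then PySem.List.pyRange 0 (PySem.List.len cs) 1
             else PySem.List.pyRange (PySem.List.len cs - 1) (-1) (-1)
  (pvLoopA cs val left_2_right tab (0, false, false)).map (fun l => String.ofList l)

-- ===== PORT B =====
-- one iteration of B's elif-chain loop body
def pvStepB (code : List Char) (st : Int × Bool × Bool) (e : Int) : Int × Bool × Bool :=
  let c := PySem.List.pyGetD code e ' '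
  let escB : Bool := PySem.List.pyGetD code (e - 1) ' ' ≠ '\\' ∨ PySem.List.pyGetD code (e - 2) ' ' = '\\'
  if c = '(' ∧ st.2.1 = false ∧ st.2.2 = false then (st.1 + 1, st.2.1, st.2.2)
  else if c = ')' ∧ st.2.1 = false ∧ st.2.2 = false then (st.1 - 1, st.2.1, st.2.2)
  else if c = '\'' ∧ st.2.2 = false then (if escB then (st.1, !st.2.1, st.2.2) else st)
  else if c = '"' ∧ st.2.1 = false then (if escB then (st.1, st.2.1, !st.2.2) else st)
  else st

-- phase 1: fold appending (end, balance-before) pairs while updating the state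
def pvScanB (code : List Char) (tab : List Int) : List (Int × Int) × (Int × Bool × Bool) :=
  tab.foldl (fun acc e => (acc.1 ++ [(e, acc.2.1)], pvStepB code acc.2 e)) ([], (0, false, false))

def get_code_until_parenthese_count_alt (code : String) (val : Int) (left_2_right : Bool) : Option String :=
  let cs := code.toList
  let tab := if left_2_right then PySem.List.pyRange 0 (PySem.List.len cs) 1
             else PySem.List.pyRange (PySem.List.len cs - 1) (-1) (-1)
  let sc := pvScanB cs tab
  -- phase 2: first table entry whose balance equals val
  let res : Option (List Char) :=
    match sc.1.find? (fun p => p.2 == val) with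
    | some p => some (if left_2_right then PySem.List.slice cs none (some p.1)
                      else PySem.List.slice cs (some p.1) none)
    | none => if sc.2.1 = val then some cs else none
  res.map (fun l => String.ofList l)

-- ===== PRECONDITION & SPEC =====
def Spec_get_code_until_parenthese_count (code : String) (val : Int) (left_2_right : Bool) (out : Option String) : Prop := out = get_code_until_parenthese_count_alt code val left_2_right
instance (code : String) (val : Int) (left_2_right : Bool) (out : Option String) : Decidable (Spec_get_code_until_parenthese_count code val left_2_right out) := by unfold Spec_get_code_until_parenthese_count; infer_instance

-- ===== CLAIM (what is proved, stated in full; the proofs are below) =====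
def Claim_equal_get_code_until_parenthese_count : Prop := ∀ (code : String) (val : Int) (left_2_right : Bool), Dom_get_code_until_parenthese_count code val left_2_right → Spec_get_code_until_parenthese_count code val left_2_right (get_code_until_parenthese_count code val left_2_right)

-- ===== LEMMAS AND PROOFS =====

-- the two loop bodies compute the same state transition
set_option maxHeartbeats 2000000 in
theorem stepA_eq_stepB (code : List Char) (st : Int × Bool × Bool) (e : Int) :
    pvStepA code st e = pvStepB code st e := by
  obtain ⟨cnt, qs, qd⟩ := st
  unfold pvStepA pvStepB pvEsc
  by_cases h1 : PySem.List.pyGetD code (e - 1) ' ' = '\\' <;>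
    by_cases h2 : PySem.List.pyGetD code (e - 2) ' ' = '\\' <;>
      simp only [h1, h2] <;> split_ifs <;> simp_all

-- recursive form of phase 1 (proof helper; cons-builds the same table pvScanB appends)
def pvPairs (code : List Char) : List Int → (Int × Bool × Bool) → List (Int × Int) × (Int × Bool × Bool)
  | [], st => ([], st)
  | e :: rest, st =>
      let r := pvPairs code rest (pvStepB code st e)
      ((e, st.1) :: r.1, r.2)

theorem scanB_eq_pairs (code : List Char) (tab : List Int) :
    ∀ (acc : List (Int × Int)) (st : Int × Bool × Bool),
      tab.foldl (fun acc e => (acc.1 ++ [(e, acc.2.1)], pvStepB code acc.2 e)) (acc, st)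
        = (acc ++ (pvPairs code tab st).1, (pvPairs code tab st).2) := by
  induction tab with
  | nil => intro acc st; simp [pvPairs]
  | cons e rest ih =>
      intro acc st
      simp only [List.foldl_cons, pvPairs]
      rw [ih]
      simp

-- A's loop equals “search pvPairs' table, else final check”
theorem loopA_eq_find (code : List Char) (val : Int) (l2r : Bool) (tab : List Int) :
    ∀ st : Int × Bool × Bool,
      pvLoopA code val l2r tab st
        = (match (pvPairs code tab st).1.find? (fun p => p.2 == val) with
           | some p => some (if l2r then PySem.List.slice code none (some p.1)
                             else PySem.List.slice code (some p.1) none)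
           | none => if (pvPairs code tab st).2.1 = val then some code else none) := by
  induction tab with
  | nil => intro st; simp [pvLoopA, pvPairs]
  | cons e rest ih =>
      intro st
      simp only [pvLoopA, pvPairs, List.find?_cons]
      by_cases h : st.1 = val
      · simp [h]
      · have hb : ((e, st.1).2 == val) = false := by simpa using h
        rw [stepA_eq_stepB, if_neg h]
        simp only [hb, ih]
        rfl

-- ===== VERDICT (by name: the statement is the Claim_ definition above) =====
theorem get_code_until_parenthese_count_spec : Claim_equal_get_code_until_parenthese_count := by
  intro code val l2r _
  unfold Spec_get_code_until_parenthese_count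
  unfold get_code_until_parenthese_count get_code_until_parenthese_count_alt pvScanB
  dsimp only
  rw [scanB_eq_pairs, loopA_eq_find]
  simp
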